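-- pv_equiv track=rewrite | github.com/JeremyFarrugia/GenAI-Project | Flask/flask-app.py | create_story_sequence
-- ===== SOURCE A (Python) =====
-- def create_story_sequence(story_dict: dict) -> tuple[list[str], list[str], list[str]]:
--     """
--     Create the sequence of the story based on the given dictionary
--
--     Returns:
--     - The story sequence as a list of paragraphs
--     - The audio prompts as a list
--     - The image prompts as a list
--     """
--     # Parse the dict to sequentially load content
--     # Iterate over the keys in the story
--     ignore_keys = ['title', 'thumbnail', 'music']
--     story_sequence = []
--     image_prompts = []
--     audio_prompts = []
--     for key in story_dict:
--         if key in ignore_keys: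
--             continue
--
--         # Branch depending on the key
--         if key.startswith('paragraph'):
--             story_sequence.append(story_dict[key])
--         elif key.startswith('image'):
--             image_prompts.append(story_dict[key])
--         elif key.startswith('audio'):
--             audio_prompts.append(story_dict[key])
--
--     return story_sequence, audio_prompts, image_prompts
-- ===== SOURCE B (Python) =====
-- def create_story_sequence(story_dict: dict) -> tuple[list[str], list[str], list[str]]:
--     # Three independent filtering passes, one per category; the ignored keys
--     # ('title', 'thumbnail', 'music') match none of the prefixes, so no explicit check.
--     story_sequence = [v for k, v in story_dict.items() if k.startswith('paragraph')]
--     audio_prompts = [v for k, v in story_dict.items() if k.startswith('audio')]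
--     image_prompts = [v for k, v in story_dict.items() if k.startswith('image')]
--     return story_sequence, audio_prompts, image_prompts
-- ===== Notes on version B (the rewrite author's own statement) =====
-- stated objective: idiomatic
-- what changed: One pass with a 3-way branch and key lookups plus an ignore-keys check is replaced by three independent list comprehensions over items(), each filtering one prefix and taking values directly.
import Mathlib
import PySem

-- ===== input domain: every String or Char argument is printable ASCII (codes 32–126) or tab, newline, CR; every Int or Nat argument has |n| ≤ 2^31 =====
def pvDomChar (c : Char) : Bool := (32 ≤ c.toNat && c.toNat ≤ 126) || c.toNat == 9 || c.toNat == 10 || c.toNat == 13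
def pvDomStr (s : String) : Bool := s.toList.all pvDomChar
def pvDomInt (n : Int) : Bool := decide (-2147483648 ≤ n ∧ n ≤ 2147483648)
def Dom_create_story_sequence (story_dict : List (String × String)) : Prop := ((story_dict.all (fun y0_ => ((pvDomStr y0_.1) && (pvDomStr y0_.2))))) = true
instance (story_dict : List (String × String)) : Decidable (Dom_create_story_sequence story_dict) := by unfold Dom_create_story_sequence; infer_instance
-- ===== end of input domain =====

-- B replaces A's single branching loop with key lookups by three independent
-- filtering passes over the items (idiomatic decomposition; same cost).


-- ===== PORT A =====
-- story_dict[key]: first match in the association list (exact for a dict, whose keys are unique);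
-- the "" default is unreachable since every looked-up key comes from the dict itself.
def csGet (l : List (String × String)) (k : String) : String :=
  match l with
  | [] => ""
  | (k', v) :: rest => if k' == k then v else csGet rest k

def csStepA (full : List (String × String))
    (acc : List String × List String × List String) (key : String) :
    List String × List String × List String :=
  if key ∈ ["title", "thumbnail", "music"] then acc
  else if PySem.Str.startswith key "paragraph" then
    (acc.1 ++ [csGet full key], acc.2.1, acc.2.2)
  else if PySem.Str.startswith key "image" then
    (acc.1, acc.2.1, acc.2.2 ++ [csGet full key])
  else if PySem.Str.startswith key "audio" then
    (acc.1, acc.2.1 ++ [csGet full key], acc.2.2)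
  else acc

-- accumulator is (story_sequence, audio_prompts, image_prompts), the return order
def create_story_sequence (story_dict : List (String × String)) : List String × List String × List String :=
  (story_dict.map Prod.fst).foldl (csStepA story_dict) ([], [], [])

-- ===== PORT B =====
def create_story_sequence_alt (story_dict : List (String × String)) : List String × List String × List String :=
  ((story_dict.filter (fun p => PySem.Str.startswith p.1 "paragraph")).map Prod.snd,
   (story_dict.filter (fun p => PySem.Str.startswith p.1 "audio")).map Prod.snd,
   (story_dict.filter (fun p => PySem.Str.startswith p.1 "image")).map Prod.snd)

-- ===== PRECONDITION & SPEC =====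
-- Pre_ excludes association lists with duplicate keys: a Python dict cannot contain them,
-- so such lists do not correspond to any input of A (the dict collapses duplicates).
def Pre_create_story_sequence (story_dict : List (String × String)) : Prop :=
  (story_dict.map Prod.fst).Nodup
instance (story_dict : List (String × String)) : Decidable (Pre_create_story_sequence story_dict) := by unfold Pre_create_story_sequence; infer_instance

def pvWitness_create_story_sequence : (List (String × String)) :=
  [("title", "t"), ("paragraph1", "a"), ("audio1", "x"), ("image1", "i"), ("paragraph2", "b")]

def Spec_create_story_sequence (story_dict : List (String × String)) (out : List String × List String × List String) : Prop := out = create_story_sequence_alt story_dict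
instance (story_dict : List (String × String)) (out : List String × List String × List String) : Decidable (Spec_create_story_sequence story_dict out) := by unfold Spec_create_story_sequence; infer_instance

-- ===== CLAIM (what is proved, stated in full; the proofs are below) =====
def Claim_equal_create_story_sequence : Prop := ∀ (story_dict : List (String × String)), Dom_create_story_sequence story_dict → Pre_create_story_sequence story_dict → Spec_create_story_sequence story_dict (create_story_sequence story_dict)

-- ===== LEMMAS AND PROOFS =====

theorem csGet_mem {l : List (String × String)} {k v : String}
    (hnd : (l.map Prod.fst).Nodup) (hmem : (k, v) ∈ l) : csGet l k = v := by
  induction l with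
  | nil => cases hmem
  | cons p rest ih =>
    obtain ⟨k', v'⟩ := p
    simp only [List.map_cons, List.nodup_cons, List.mem_map] at hnd
    rcases List.mem_cons.mp hmem with h | h
    · injection h with h1 h2
      subst h1; subst h2
      simp [csGet]
    · have hne : k' ≠ k := by
        intro he; exact hnd.1 ⟨(k, v), h, by simp [he]⟩
      simp only [csGet, beq_iff_eq, if_neg hne]
      exact ih hnd.2 h

theorem pref_head {l s : List Char} (h : l <+: s) {a : Char} (ha : l.head? = some a) :
    s.head? = some a := by
  rcases h with ⟨t, rfl⟩
  cases l with
  | nil => cases ha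
  | cons x xs => simpa using ha

-- strings cannot start with two prefixes whose first characters differ
theorem sw_excl {s : String} {p q : String} {a b : Char}
    (hp : PySem.Str.startswith s p = true) (hpa : p.toList.head? = some a)
    (hqb : q.toList.head? = some b) (hab : a ≠ b) :
    PySem.Str.startswith s q = false := by
  cases hq : PySem.Str.startswith s q with
  | false => rfl
  | true =>
    exfalso
    have h1 : p.toList <+: s.toList := by
      rw [← PySem.Chars.startswith_iff]; simpa using hp
    have h2 : q.toList <+: s.toList := by
      rw [← PySem.Chars.startswith_iff]; simpa using hq
    have e1 := pref_head h1 hpa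
    have e2 := pref_head h2 hqb
    rw [e1] at e2
    exact hab (Option.some.inj e2)

theorem csFold_eq (full l : List (String × String))
    (acc : List String × List String × List String)
    (hnd : (full.map Prod.fst).Nodup) (hsub : ∀ p ∈ l, p ∈ full) :
    (l.map Prod.fst).foldl (csStepA full) acc =
      (acc.1 ++ (l.filter (fun p => PySem.Str.startswith p.1 "paragraph")).map Prod.snd,
       acc.2.1 ++ (l.filter (fun p => PySem.Str.startswith p.1 "audio")).map Prod.snd,
       acc.2.2 ++ (l.filter (fun p => PySem.Str.startswith p.1 "image")).map Prod.snd) := by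
  induction l generalizing acc with
  | nil => simp
  | cons p rest ih =>
    obtain ⟨k, v⟩ := p
    have hget : csGet full k = v := csGet_mem hnd (hsub _ (List.mem_cons_self ..))
    have hrest : ∀ q ∈ rest, q ∈ full := fun q hq => hsub q (List.mem_cons_of_mem _ hq)
    simp only [List.map_cons, List.foldl_cons, List.filter_cons]
    by_cases hig : k ∈ ["title", "thumbnail", "music"]
    · simp only [List.mem_cons, List.not_mem_nil, or_false] at hig
      have h1 : PySem.Str.startswith k "paragraph" = false := by
        rcases hig with rfl | rfl | rfl <;> decide
      have h2 : PySem.Str.startswith k "audio" = false := by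
        rcases hig with rfl | rfl | rfl <;> decide
      have h3 : PySem.Str.startswith k "image" = false := by
        rcases hig with rfl | rfl | rfl <;> decide
      have hig' : k ∈ ["title", "thumbnail", "music"] := by
        simp only [List.mem_cons, List.not_mem_nil, or_false]; exact hig
      simp only [csStepA, if_pos hig', ih acc hrest, h1, h2, h3]
      simp
    · by_cases hp : PySem.Str.startswith k "paragraph" = true
      · have ha : PySem.Str.startswith k "audio" = false :=
          sw_excl (a := 'p') (b := 'a') hp (by decide) (by decide) (by decide)
        have hi : PySem.Str.startswith k "image" = false :=
          sw_excl (a := 'p') (b := 'i') hp (by decide) (by decide) (by decide)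
        simp only [csStepA, if_neg hig, hget, ih _ hrest, hp, ha, hi]
        simp
      · by_cases hi : PySem.Str.startswith k "image" = true
        · have ha : PySem.Str.startswith k "audio" = false :=
            sw_excl (a := 'i') (b := 'a') hi (by decide) (by decide) (by decide)
          simp only [csStepA, if_neg hig, hget, ih _ hrest,
            eq_false_of_ne_true hp, ha, hi]
          simp
        · by_cases ha : PySem.Str.startswith k "audio" = true
          · simp only [csStepA, if_neg hig, hget, ih _ hrest,
              eq_false_of_ne_true hp, eq_false_of_ne_true hi, ha]
            simp
          · simp only [csStepA, if_neg hig, ih _ hrest,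
              eq_false_of_ne_true hp, eq_false_of_ne_true hi, eq_false_of_ne_true ha]
            simp

-- ===== VERDICT (by name: the statement is the Claim_ definition above) =====
theorem create_story_sequence_spec : Claim_equal_create_story_sequence := by
  intro d _ hpre
  unfold Spec_create_story_sequence create_story_sequence create_story_sequence_alt
  rw [csFold_eq d d ([], [], []) hpre (fun _ h => h)]
  simp
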